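-- pv_equiv track=rewrite | github.com/zsecq94/ssafy-1 | 1. algorithm/8월/im대비/배수 스위치.py | asd
-- ===== SOURCE A (Python) =====
-- def asd(arr):
--     cnt = 0
--     Z = 1
--
--     while True:
--         Y = 0
--         N = 0
--         for i in range(1, len(arr)):
--             if arr[i] == 'Y':
--                 Y += 1
--             else:
--                 N += 1
--         if Y == 0:
--             return cnt
--         else:
--             if arr[Z] == 'Y':
--                 for i in range(Z, len(arr), Z):
--                     if arr[i] == 'Y':
--                         arr[i] = 'N'
--                     else:
--                         arr[i] = 'Y'
--                 cnt += 1
--             Z += 1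
-- ===== SOURCE B (Python) =====
-- def asd(arr):
--     # One-pass divisor sieve over a toggle-parity array: each position is
--     # decided once, with no per-round rescan and no mutation of arr
--     # (equivalence is about the return value only; A mutates arr).
--     n = len(arr)
--     togg = [False] * n
--     cnt = 0
--     for z in range(1, n):
--         if (arr[z] == 'Y') != togg[z]:
--             cnt += 1
--             for m in range(z, n, z):
--                 togg[m] = not togg[m]
--     return cnt
-- ===== Notes on version B (the rewrite author's own statement) =====
-- stated objective: alternative
-- what changed: Replaces A's while-loop that rescans the whole array to count 'Y's before every switch step (and flips the array in place) with a single left-to-right divisor sieve over a toggle-parity array, so each position is decided once with no rescan and no mutation of arr.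
import Mathlib
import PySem

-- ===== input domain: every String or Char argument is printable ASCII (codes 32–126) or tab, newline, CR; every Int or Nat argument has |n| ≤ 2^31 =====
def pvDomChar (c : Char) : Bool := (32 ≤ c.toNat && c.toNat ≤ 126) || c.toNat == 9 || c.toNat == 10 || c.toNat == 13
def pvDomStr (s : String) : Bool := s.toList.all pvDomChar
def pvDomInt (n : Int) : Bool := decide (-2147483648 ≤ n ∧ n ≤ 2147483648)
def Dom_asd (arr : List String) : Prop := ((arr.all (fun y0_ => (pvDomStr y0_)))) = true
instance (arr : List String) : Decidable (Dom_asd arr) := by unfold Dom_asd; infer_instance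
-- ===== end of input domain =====

-- B replaces A's rescan-every-round in-place switch simulation by a one-pass
-- divisor sieve over a toggle-parity array (objective: alternative).
-- A mutates its argument in place; B does not: the equivalence proved here is
-- about the RETURN value only.

-- ===== PORT A =====
-- the Y/N counting pass: for i in range(1, len(arr)): Y/N += 1
def asdCount (a : List String) (i : Nat) (Y N : Nat) : Nat × Nat :=
  if _h : i < a.length then
    if a.getD i "" == "Y" then asdCount a (i + 1) (Y + 1) N
    else asdCount a (i + 1) Y (N + 1)
  else (Y, N)
termination_by a.length - i

-- the flip pass: for i in range(Z, len(arr), Z): arr[i] = 'N' if arr[i]=='Y' else 'Y'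
def asdFlip (a : List String) (i z : Nat) (hz : 0 < z) : List String :=
  if _h : i < a.length then
    asdFlip (a.set i (if a.getD i "" == "Y" then "N" else "Y")) (i + z) z hz
  else a
termination_by a.length - i
decreasing_by simp only [List.length_set]; omega

-- the 'while True' loop; fuel only makes the loop total: arr.length + 1
-- iterations always suffice (proved in the lemmas below), so the fuel-exhausted
-- branch is never reached from asd.
def asdLoop (fuel : Nat) (a : List String) (cnt : Int) (Z : Nat) (hZ : 0 < Z) : Int :=
  match fuel with
  | 0 => cnt
  | fuel + 1 =>
    if (asdCount a 1 0 0).1 == 0 then cnt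
    else
      if a.getD Z "" == "Y" then
        asdLoop fuel (asdFlip a Z Z hZ) (cnt + 1) (Z + 1) (by omega)
      else
        asdLoop fuel a cnt (Z + 1) (by omega)

def asd (arr : List String) : Int := asdLoop (arr.length + 1) arr 0 1 (by omega)

-- ===== PORT B =====
-- inner loop: for m in range(z, n, z): togg[m] = not togg[m]
def altTogg (t : List Bool) (i z : Nat) (hz : 0 < z) : List Bool :=
  if _h : i < t.length then
    altTogg (t.set i (!(t.getD i false))) (i + z) z hz
  else t
termination_by t.length - i
decreasing_by simp only [List.length_set]; omega

-- outer loop: for z in range(1, n): ...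
def altLoop (arr : List String) (togg : List Bool) (cnt : Int) (z : Nat) (hz : 0 < z) : Int :=
  if h : z < arr.length then
    if (arr.getD z "" == "Y") != togg.getD z false then
      altLoop arr (altTogg togg z z hz) (cnt + 1) (z + 1) (by omega)
    else altLoop arr togg cnt (z + 1) (by omega)
  else cnt
termination_by arr.length - z

def asd_alt (arr : List String) : Int :=
  altLoop arr (List.replicate arr.length false) 0 1 (by omega)

-- ===== PRECONDITION & SPEC =====
def Spec_asd (arr : List String) (out : Int) : Prop := out = asd_alt arr
instance (arr : List String) (out : Int) : Decidable (Spec_asd arr out) := by unfold Spec_asd; infer_instance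

-- ===== CLAIM (what is proved, stated in full; the proofs are below) =====
def Claim_equal_asd : Prop := ∀ (arr : List String), Dom_asd arr → Spec_asd arr (asd arr)

-- ===== LEMMAS AND PROOFS =====

theorem getD_set_ne {α : Type} (l : List α) {i j : Nat} (x d : α) (h : i ≠ j) :
    (l.set i x).getD j d = l.getD j d := by
  simp [List.getD_eq_getElem?_getD, List.getElem?_set_ne h]

theorem getD_set_self {α : Type} (l : List α) {i : Nat} (x d : α) (h : i < l.length) :
    (l.set i x).getD i d = x := by
  simp [List.getD_eq_getElem?_getD, List.getElem?_set_self h]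

theorem asdFlip_length (a : List String) (s z : Nat) (hz : 0 < z) :
    (asdFlip a s z hz).length = a.length := by
  fun_induction asdFlip a s z hz with
  | case1 a s h ih => simpa using ih
  | case2 => rfl
theorem asdFlip_getD_other (a : List String) (s z : Nat) (hz : 0 < z) (j : Nat)
    (hj : ∀ k : Nat, j ≠ s + k * z) :
    (asdFlip a s z hz).getD j "" = a.getD j "" := by
  fun_induction asdFlip a s z hz with
  | case1 a s h ih =>
      simp only [dite_eq_ite] at ih
      rw [ih, getD_set_ne]
      · exact fun he => hj 0 (by omega)
      · intro k
        have := hj (k + 1)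
        have e : (k + 1) * z = k * z + z := by ring
        omega
  | case2 => rfl

theorem asdFlip_getD_mul (a : List String) (s z : Nat) (hz : 0 < z) :
    ∀ j k : Nat, j = s + k * z → j < a.length →
    (asdFlip a s z hz).getD j "" =
      (if a.getD j "" == "Y" then "N" else "Y") := by
  fun_induction asdFlip a s z hz with
  | case1 a s h ih =>
      simp only [dite_eq_ite] at ih
      intro j k hk hl
      cases k with
      | zero =>
          have hjs : j = s := by omega
          subst hjs
          rw [asdFlip_getD_other _ _ _ _ _ (by intro k; omega)]
          rw [getD_set_self _ _ _ h]
      | succ k' =>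
          have hk' : j = (s + z) + k' * z := by
            have : (k' + 1) * z = k' * z + z := by ring
            omega
          have hep : k' * z + z = (k' + 1) * z := by ring
          have hne : s ≠ j := by omega
          rw [ih j k' hk' (by simpa using hl)]
          simp only [getD_set_ne _ _ _ hne]
  | case2 a s h =>
      intro j k hk hl
      omega
theorem altTogg_length (t : List Bool) (s z : Nat) (hz : 0 < z) :
    (altTogg t s z hz).length = t.length := by
  fun_induction altTogg t s z hz with
  | case1 t s h ih => simpa using ih
  | case2 => rfl

theorem altTogg_getD_other (t : List Bool) (s z : Nat) (hz : 0 < z) (j : Nat)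
    (hj : ∀ k : Nat, j ≠ s + k * z) :
    (altTogg t s z hz).getD j false = t.getD j false := by
  fun_induction altTogg t s z hz with
  | case1 t s h ih =>
      rw [ih, getD_set_ne]
      · exact fun he => hj 0 (by omega)
      · intro k
        have := hj (k + 1)
        have e : (k + 1) * z = k * z + z := by ring
        omega
  | case2 => rfl

theorem altTogg_getD_mul (t : List Bool) (s z : Nat) (hz : 0 < z) :
    ∀ j k : Nat, j = s + k * z → j < t.length →
    (altTogg t s z hz).getD j false = !(t.getD j false) := by
  fun_induction altTogg t s z hz with
  | case1 t s h ih =>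
      intro j k hk hl
      cases k with
      | zero =>
          have hjs : j = s := by omega
          subst hjs
          rw [altTogg_getD_other _ _ _ _ _ (by intro k; omega)]
          rw [getD_set_self _ _ _ h]
      | succ k' =>
          have hk' : j = (s + z) + k' * z := by
            have : (k' + 1) * z = k' * z + z := by ring
            omega
          have hep : k' * z + z = (k' + 1) * z := by ring
          have hne : s ≠ j := by omega
          rw [ih j k' hk' (by simpa using hl)]
          simp only [getD_set_ne _ _ _ hne]
  | case2 t s h =>
      intro j k hk hl
      omega

theorem asdCount_fst_zero (a : List String) :
    ∀ i Y N : Nat, ((asdCount a i Y N).1 = 0 ↔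
      (Y = 0 ∧ ∀ j, i ≤ j → j < a.length → (a.getD j "" == "Y") = false)) := by
  intro i Y N
  fun_induction asdCount a i Y N with
  | case1 i Y N h hy ih =>
      rw [ih]
      constructor
      · rintro ⟨h1, -⟩; omega
      · rintro ⟨h1, h2⟩
        have hc := h2 i (le_refl i) h
        rw [hy] at hc
        exact absurd hc (by decide)
  | case2 i Y N h hy ih =>
      rw [ih]
      constructor
      · rintro ⟨h1, h2⟩
        refine ⟨h1, fun j hj hjl => ?_⟩
        rcases Nat.eq_or_lt_of_le hj with rfl | hlt
        · simpa using hy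
        · exact h2 j hlt hjl
      · rintro ⟨h1, h2⟩
        exact ⟨h1, fun j hj hjl => h2 j (by omega) hjl⟩
  | case3 i Y N h =>
      constructor
      · intro h0; exact ⟨h0, fun j hj hjl => by omega⟩
      · rintro ⟨h1, -⟩; exact h1
theorem altLoop_const (arr : List String) :
    ∀ (togg : List Bool) (cnt : Int) (z : Nat) (hz : 0 < z),
    (∀ j, z ≤ j → j < arr.length → ((arr.getD j "" == "Y") != togg.getD j false) = false) →
    altLoop arr togg cnt z hz = cnt := by
  intro togg cnt z hz hall
  fun_induction altLoop arr togg cnt z hz with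
  | case1 togg cnt z hz h hb ih =>
      have hc := hall z (le_refl z) h
      rw [hb] at hc
      exact absurd hc (by decide)
  | case2 togg cnt z hz h hb ih =>
      exact ih (fun j hj hjl => hall j (by omega) hjl)
  | case3 => rfl
theorem flip_beq (s : String) : ((if s == "Y" then "N" else "Y") == "Y") = !(s == "Y") := by
  by_cases h : (s == "Y") = true <;> simp [h]

theorem asd_main : ∀ (fuel : Nat) (arr a : List String) (togg : List Bool) (cnt : Int)
    (z : Nat) (hz : 0 < z),
    a.length = arr.length → togg.length = arr.length →
    z ≤ arr.length + 1 → arr.length + 2 - z ≤ fuel →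
    (∀ i, z ≤ i → i < arr.length →
      (a.getD i "" == "Y") = ((arr.getD i "" == "Y") != togg.getD i false)) →
    (∀ i, 1 ≤ i → i < z → i < arr.length → (a.getD i "" == "Y") = false) →
    asdLoop fuel a cnt z hz = altLoop arr togg cnt z hz := by
  intro fuel
  induction fuel with
  | zero => intro arr a togg cnt z hz hla hlt hzb hfb _ _; omega
  | succ fuel IH =>
      intro arr a togg cnt z hz hla hlt hzb hfb hRel hLow
      rw [asdLoop]
      by_cases hY : (asdCount a 1 0 0).1 = 0
      · rw [if_pos (by simp [hY])]
        obtain ⟨-, hall⟩ := (asdCount_fst_zero a 1 0 0).1 hY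
        refine (altLoop_const arr togg cnt z hz ?_).symm
        intro j hj hjl
        rw [← hRel j hj hjl]
        exact hall j (by omega) (by omega)
      · have hex : ∃ j, 1 ≤ j ∧ j < a.length ∧ (a.getD j "" == "Y") = true := by
          by_contra hc
          push Not at hc
          exact hY ((asdCount_fst_zero a 1 0 0).2
            ⟨rfl, fun j hj hjl => by simpa using hc j hj hjl⟩)
        obtain ⟨j, hj1, hjl, hjY⟩ := hex
        have hzj : z ≤ j := by
          rcases Nat.lt_or_ge j z with hlt' | hge
          · rw [hLow j hj1 hlt' (by omega)] at hjY; exact absurd hjY (by decide)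
          · exact hge
        have hzlt : z < arr.length := by omega
        rw [if_neg (by simp [hY])]
        rw [altLoop, dif_pos hzlt]
        have hRz := (hRel z (le_refl z) hzlt).symm
        rw [hRz]
        by_cases hA : (a.getD z "" == "Y") = true
        · rw [if_pos hA, if_pos hA]
          refine IH arr (asdFlip a z z hz) (altTogg togg z z hz) (cnt + 1) (z + 1) (by omega)
            (by rw [asdFlip_length]; exact hla) (by rw [altTogg_length]; exact hlt)
            (by omega) (by omega) ?_ ?_
          · intro i hi hil
            by_cases hm : ∃ k : Nat, i = z + k * z
            · obtain ⟨k, hk⟩ := hm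
              rw [asdFlip_getD_mul a z z hz i k hk (by omega)]
              rw [altTogg_getD_mul togg z z hz i k hk (by omega)]
              rw [flip_beq, hRel i (by omega) hil]
              cases (arr.getD i "" == "Y") <;> cases (togg.getD i false) <;> rfl
            · push Not at hm
              rw [asdFlip_getD_other a z z hz i hm, altTogg_getD_other togg z z hz i hm]
              exact hRel i (by omega) hil
          · intro i h1 hiz hil
            rcases Nat.lt_or_ge i z with hlt' | hge
            · rw [asdFlip_getD_other a z z hz i (by intro k; have : 0 ≤ k * z := Nat.zero_le _; omega)]
              exact hLow i h1 hlt' hil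
            · have hiz' : i = z := by omega
              subst hiz'
              rw [asdFlip_getD_mul a i i hz i 0 (by omega) (by omega)]
              rw [flip_beq, hA]
              rfl
        · rw [if_neg hA, if_neg hA]
          refine IH arr a togg cnt (z + 1) (by omega) hla hlt (by omega) (by omega) ?_ ?_
          · intro i hi hil; exact hRel i (by omega) hil
          · intro i h1 hiz hil
            rcases Nat.lt_or_ge i z with hlt' | hge
            · exact hLow i h1 hlt' hil
            · have : i = z := by omega
              subst this
              simpa using hA

-- ===== VERDICT (by name: the statement is the Claim_ definition above) =====
theorem asd_spec : Claim_equal_asd := by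
  intro arr _
  unfold Spec_asd asd asd_alt
  refine asd_main (arr.length + 1) arr arr (List.replicate arr.length false) 0 1 (by omega)
    rfl (by simp) (by omega) (by omega) ?_ ?_
  · intro i hi hil
    have hr : (List.replicate arr.length false).getD i false = false := by
      simp [List.getD_eq_getElem?_getD, hil]
    rw [hr]
    cases (arr.getD i "" == "Y") <;> rfl
  · intro i h1 hi hil
    omega
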